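-- pv_equiv track=rewrite | github.com/jasbi/negation_production | scripts/study2_bootstrap.py | has_negation
-- ===== SOURCE A (Python) =====
-- def has_negation(sentence):
--
-- 	negation = {}
--
-- 	no = []
-- 	nt = []
-- 	nOt = []
--
-- 	for tok in sentence:
-- 		if tok[1] == 'no':
-- 			no.append(tok[0])
-- 		if tok[1] == 'not':
-- 			if tok[2] == "n't":
-- 				nt.append(tok[0])
-- 			else:
-- 				nOt.append(tok[0])
--
-- 	if len(no) != 0:
-- 		negation['no'] = no
-- 	if len(nt) != 0:
-- 		negation["n't"] = nt
-- 	if len(nOt) != 0: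
-- 		negation['not'] = nOt
--
-- 	if len(negation) != 0:
-- 		return negation
--
-- 	return None
-- ===== SOURCE B (Python) =====
-- def has_negation(sentence):
--     # Three staged comprehension passes (no loop state): one filtered pass per bucket.
--     groups = [
--         ('no',  [t[0] for t in sentence if t[1] == 'no']),
--         ("n't", [t[0] for t in sentence if t[1] == 'not' and t[2] == "n't"]),
--         ('not', [t[0] for t in sentence if t[1] == 'not' and t[2] != "n't"]),
--     ]
--     negation = {k: v for k, v in groups if v}
--     return negation or None
-- ===== Notes on version B (the rewrite author's own statement) =====
-- stated objective: simpler
-- what changed: Replaces A's stateful single loop with three accumulator lists and three post-loop insertion branches by three stateless filtered comprehension passes (one per bucket) and a dict comprehension keeping the non-empty groups.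
import Mathlib
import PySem

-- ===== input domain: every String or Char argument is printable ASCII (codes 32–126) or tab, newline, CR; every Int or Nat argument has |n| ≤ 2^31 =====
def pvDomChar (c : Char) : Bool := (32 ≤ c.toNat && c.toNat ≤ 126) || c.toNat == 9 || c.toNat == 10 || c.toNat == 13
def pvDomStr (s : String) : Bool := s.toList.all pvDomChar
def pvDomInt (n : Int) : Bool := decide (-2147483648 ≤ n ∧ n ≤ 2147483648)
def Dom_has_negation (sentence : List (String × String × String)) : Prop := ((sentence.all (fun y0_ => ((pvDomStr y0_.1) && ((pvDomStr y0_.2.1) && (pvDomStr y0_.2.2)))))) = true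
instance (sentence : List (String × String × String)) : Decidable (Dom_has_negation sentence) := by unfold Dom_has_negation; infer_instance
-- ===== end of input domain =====

-- B is simpler: three stateless filtered passes (one per bucket) plus a dict
-- comprehension over the non-empty groups, instead of A's stateful loop with
-- three accumulator lists and three post-loop insertion branches.

-- ===== PORT A =====
-- A's loop body: three accumulator lists (no, nt, nOt), appended in order
def hnStepA (acc : List String × List String × List String)
    (tok : String × String × String) : List String × List String × List String :=
  let acc := if tok.2.1 == "no" then (acc.1 ++ [tok.1], acc.2.1, acc.2.2) else acc
  if tok.2.1 == "not" then
    if tok.2.2 == "n't" then (acc.1, acc.2.1 ++ [tok.1], acc.2.2)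
    else (acc.1, acc.2.1, acc.2.2 ++ [tok.1])
  else acc

def has_negation (sentence : List (String × String × String)) :
    Option (List (String × List String)) :=
  let st := sentence.foldl hnStepA ([], [], [])
  let negation : List (String × List String) := []
  let negation := if st.1.length ≠ 0 then negation ++ [("no", st.1)] else negation
  let negation := if st.2.1.length ≠ 0 then negation ++ [("n't", st.2.1)] else negation
  let negation := if st.2.2.length ≠ 0 then negation ++ [("not", st.2.2)] else negation
  if negation.length ≠ 0 then some negation else none

-- ===== PORT B =====
-- one comprehension pass: [t[0] for t in sentence if p t]
def hnPick (p : String × String × String → Bool)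
    (sentence : List (String × String × String)) : List String :=
  (sentence.filter p).map (fun t => t.1)

def has_negation_alt (sentence : List (String × String × String)) :
    Option (List (String × List String)) :=
  let groups : List (String × List String) :=
    [("no",  hnPick (fun t => t.2.1 == "no") sentence),
     ("n't", hnPick (fun t => t.2.1 == "not" && t.2.2 == "n't") sentence),
     ("not", hnPick (fun t => t.2.1 == "not" && !(t.2.2 == "n't")) sentence)]
  let negation := groups.filter (fun kv => !kv.2.isEmpty)
  if negation.isEmpty then none else some negation

-- ===== PRECONDITION & SPEC =====
def Spec_has_negation (sentence : List (String × String × String)) (out : Option (List (String × List String))) : Prop := out = has_negation_alt sentence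
instance (sentence : List (String × String × String)) (out : Option (List (String × List String))) : Decidable (Spec_has_negation sentence out) := by unfold Spec_has_negation; infer_instance

-- ===== CLAIM (what is proved, stated in full; the proofs are below) =====
def Claim_equal_has_negation : Prop := ∀ (sentence : List (String × String × String)), Dom_has_negation sentence → Spec_has_negation sentence (has_negation sentence)

-- ===== LEMMAS AND PROOFS =====

-- A's fold computes exactly B's three filtered passes (with the accumulator prefixed).
theorem hn_foldA_eq (sentence : List (String × String × String))
    (a b c : List String) :
    sentence.foldl hnStepA (a, b, c) =
      (a ++ hnPick (fun t => t.2.1 == "no") sentence,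
       b ++ hnPick (fun t => t.2.1 == "not" && t.2.2 == "n't") sentence,
       c ++ hnPick (fun t => t.2.1 == "not" && !(t.2.2 == "n't")) sentence) := by
  induction sentence generalizing a b c with
  | nil => simp [hnPick]
  | cons tok rest ih =>
    simp only [List.foldl_cons, hnStepA]
    by_cases h1 : tok.2.1 = "no" <;> by_cases h2 : tok.2.1 = "not" <;>
      by_cases h3 : tok.2.2 = "n't" <;>
      simp_all [hnPick]

-- ===== VERDICT (by name: the statement is the Claim_ definition above) =====
theorem has_negation_spec : Claim_equal_has_negation := by
  intro sentence _
  unfold Spec_has_negation has_negation has_negation_alt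
  rw [hn_foldA_eq]
  set l1 := hnPick (fun t => t.2.1 == "no") sentence
  set l2 := hnPick (fun t => t.2.1 == "not" && t.2.2 == "n't") sentence
  set l3 := hnPick (fun t => t.2.1 == "not" && !(t.2.2 == "n't")) sentence
  have f : ∀ (l : List String), l.isEmpty = decide (l = []) := by
    intro l; cases l <;> simp
  simp only [f, List.filter]
  by_cases e1 : l1 = [] <;> by_cases e2 : l2 = [] <;> by_cases e3 : l3 = [] <;>
    simp [e1, e2, e3]
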